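-- pv_equiv track=rewrite | github.com/ultratrikx/ics3u1 | exam.py | remove_deuplicates
-- ===== SOURCE A (Python) =====
-- def remove_deuplicates(list):
--     newList = []
--     newListLower = []
--     for i in list:
--         if i.lower() not in newListLower:
--             newList.append(i)
--             newListLower.append(i.lower())
--     return newList, newListLower
-- ===== SOURCE B (Python) =====
-- def remove_deuplicates(list):
--     newList = []
--     newListLower = []
--     pending = [(x, x.lower()) for x in list]
--     while pending:
--         head, hl = pending[0]
--         newList.append(head)
--         newListLower.append(hl)
--         pending = [p for p in pending[1:] if p[1] != hl]
--     return newList, newListLower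
-- ===== Notes on version B (the rewrite author's own statement) =====
-- stated objective: alternative
-- what changed: Replaces A's single pass with two parallel seen-accumulator lists (membership test against everything kept so far) by a nub-style worklist: pair each element with its lowercasing once, then repeatedly emit the head and filter all of its case-insensitive duplicates out of the remaining worklist, so no seen-structure or membership test exists.
import Mathlib
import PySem

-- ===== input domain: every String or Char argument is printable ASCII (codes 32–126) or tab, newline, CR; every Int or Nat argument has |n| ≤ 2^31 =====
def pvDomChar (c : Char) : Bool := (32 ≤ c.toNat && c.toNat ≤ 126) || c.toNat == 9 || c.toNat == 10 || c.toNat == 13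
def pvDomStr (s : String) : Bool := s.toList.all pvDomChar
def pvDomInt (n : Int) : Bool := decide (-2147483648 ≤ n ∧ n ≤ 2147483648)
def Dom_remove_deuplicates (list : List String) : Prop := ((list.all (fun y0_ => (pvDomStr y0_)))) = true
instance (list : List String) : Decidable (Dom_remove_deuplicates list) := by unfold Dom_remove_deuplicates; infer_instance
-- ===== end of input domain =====

-- B replaces A's seen-accumulator pass by a nub-style worklist loop (emit the head, filter
-- its case-insensitive duplicates out of the remaining input); objective: alternative.

-- ===== PORT A =====
def remove_deuplicates (list : List String) : List String × List String :=
  list.foldl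
    (fun (st : List String × List String) i =>
      if st.2.contains (PySem.Str.lower i) then st
      else (st.1 ++ [i], st.2 ++ [PySem.Str.lower i]))
    ([], [])

-- ===== PORT B =====
def removeDupLoop : List (String × String) → List String → List String → List String × List String
  | [], newList, newListLower => (newList, newListLower)
  | (head, hl) :: rest, newList, newListLower =>
    removeDupLoop (rest.filter (fun p => p.2 != hl))
      (newList ++ [head]) (newListLower ++ [hl])
termination_by pending => pending.length
decreasing_by
  have h1 : (rest.attach.filter (fun x => (x.1).2 != hl)).length ≤ rest.attach.length :=
    List.length_filter_le _ _
  simpa using Nat.lt_succ_of_le h1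

def remove_deuplicates_alt (list : List String) : List String × List String :=
  removeDupLoop (list.map (fun x => (x, PySem.Str.lower x))) [] []

-- ===== PRECONDITION & SPEC =====
def Spec_remove_deuplicates (list : List String) (out : List String × List String) : Prop := out = remove_deuplicates_alt list
instance (list : List String) (out : List String × List String) : Decidable (Spec_remove_deuplicates list out) := by unfold Spec_remove_deuplicates; infer_instance

-- ===== CLAIM (what is proved, stated in full; the proofs are below) =====
def Claim_equal_remove_deuplicates : Prop := ∀ (list : List String), Dom_remove_deuplicates list → Spec_remove_deuplicates list (remove_deuplicates list)

-- ===== LEMMAS AND PROOFS =====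

@[simp] theorem removeDupLoop_nil (r m : List String) : removeDupLoop [] r m = (r, m) := by
  rw [removeDupLoop.eq_def]

theorem removeDupLoop_cons (head hl : String) (rest : List (String × String))
    (r m : List String) :
    removeDupLoop ((head, hl) :: rest) r m
    = removeDupLoop (rest.filter (fun p => p.2 != hl)) (r ++ [head]) (m ++ [hl]) := by
  rw [removeDupLoop]

-- Invariant: A's loop started from state (r, m) computes B's worklist loop on the
-- remaining elements whose lowercasing is not already in m, paired with their lowercasings.
theorem remove_deuplicates_inv :
    ∀ (n : Nat) (l : List String), l.length ≤ n → ∀ (r m : List String),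
    l.foldl
      (fun (st : List String × List String) i =>
        if st.2.contains (PySem.Str.lower i) then st
        else (st.1 ++ [i], st.2 ++ [PySem.Str.lower i]))
      (r, m)
    = removeDupLoop
        ((l.filter (fun y => !(m.contains (PySem.Str.lower y)))).map
          (fun x => (x, PySem.Str.lower x))) r m := by
  intro n
  induction n with
  | zero =>
    intro l hl r m
    have : l = [] := List.eq_nil_of_length_eq_zero (Nat.le_zero.mp hl)
    subst this
    simp
  | succ n ih =>
    intro l hl r m
    cases l with
    | nil => simp
    | cons i t =>
      simp only [List.foldl_cons, List.filter_cons]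
      by_cases h : m.contains (PySem.Str.lower i) = true
      · rw [if_pos h]
        simp only [h, Bool.not_true, if_neg (by simp : ¬ (false = true))]
        exact ih t (Nat.le_of_succ_le_succ (by simpa using hl)) r m
      · have h' : m.contains (PySem.Str.lower i) = false := by simpa using h
        rw [if_neg h]
        rw [ih t (Nat.le_of_succ_le_succ (by simpa using hl)) (r ++ [i]) (m ++ [PySem.Str.lower i])]
        simp only [h', Bool.not_false, if_true, List.map_cons]
        rw [removeDupLoop_cons]
        congr 1
        rw [List.filter_map]
        congr 1
        rw [List.filter_filter]
        apply List.filter_congr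
        intro y _
        by_cases hy : PySem.Str.lower y = PySem.Str.lower i <;>
          simp [hy, bne, Function.comp]

-- ===== VERDICT (by name: the statement is the Claim_ definition above) =====
theorem remove_deuplicates_spec : Claim_equal_remove_deuplicates := by
  intro list _
  unfold Spec_remove_deuplicates remove_deuplicates remove_deuplicates_alt
  simpa using remove_deuplicates_inv list.length list (Nat.le_refl _) [] []
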